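-- pv_equiv track=rewrite | github.com/pinkmann300/dsa_cpp | data_structures/dp/lec2/minTriPath.py | minTriPathMemo
-- ===== SOURCE A (Python) =====
-- def minTriPathMemo(row, col, grid, dp):
--     if (dp[row][col] != -1):
--         return dp[row][col]
--     if (row == (len(grid) - 1) ):
--         return grid[row][col]
--     down = grid[row][col] + minTriPathMemo(row + 1, col, grid, dp)
--     diagonal = grid[row][col] + minTriPathMemo(row + 1, col + 1, grid, dp)
--     dp[row][col] = min(down, diagonal)
--     return dp[row][col]
-- ===== SOURCE B (Python) =====
-- def minTriPathMemo(row, col, grid, dp):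
--     # Bottom-up row tabulation instead of A's mutating top-down memo recursion.
--     # Does NOT mutate dp (A fills dp in place); return value is the same.
--     v = dp[row][col]
--     if v != -1:
--         return v
--     n = len(grid)
--
--     def solve_row(r):
--         if r == n - 1:
--             return [dp[r][c] if dp[r][c] != -1 else grid[r][c]
--                     for c in range(r + 1)]
--         nxt = solve_row(r + 1)
--         return [dp[r][c] if dp[r][c] != -1
--                 else grid[r][c] + min(nxt[c], nxt[c + 1])
--                 for c in range(r + 1)]
--
--     return solve_row(row)[col]
-- ===== Notes on version B (the rewrite author's own statement) =====
-- stated objective: alternative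
-- what changed: A's top-down recursion that memoizes by mutating dp in place is replaced by a non-mutating bottom-up tabulation that builds each triangle row from the row below (after the same initial memo-lookup short-circuit); equivalence is about the return value only, B does not fill dp.
-- outside the precondition, e.g. on minTriPathMemo(0, 1, [[1, 2]], [[-1, -1]]): A returns 2, B raises IndexError
import Mathlib
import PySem

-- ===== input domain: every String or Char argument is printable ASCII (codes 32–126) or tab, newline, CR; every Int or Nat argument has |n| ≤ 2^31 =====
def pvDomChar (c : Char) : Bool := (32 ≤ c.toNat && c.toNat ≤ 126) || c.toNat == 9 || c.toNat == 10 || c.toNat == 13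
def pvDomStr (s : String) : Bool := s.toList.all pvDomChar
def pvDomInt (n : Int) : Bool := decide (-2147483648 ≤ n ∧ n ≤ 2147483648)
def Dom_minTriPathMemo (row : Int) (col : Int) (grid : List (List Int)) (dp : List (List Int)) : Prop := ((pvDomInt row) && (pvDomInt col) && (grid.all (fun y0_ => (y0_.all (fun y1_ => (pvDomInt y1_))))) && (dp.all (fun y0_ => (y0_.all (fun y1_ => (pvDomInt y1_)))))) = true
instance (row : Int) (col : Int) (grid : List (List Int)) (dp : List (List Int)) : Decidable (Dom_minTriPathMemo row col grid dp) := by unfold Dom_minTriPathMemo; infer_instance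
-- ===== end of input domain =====

-- B replaces A's mutating top-down memo recursion by a non-mutating bottom-up row
-- tabulation; equivalence is about the RETURN value only (A fills dp in place, B does not).

-- xss[i][j] under Python indexing (negative i/j wrap); defaults are only reached
-- outside Pre_, where nothing is claimed.
def pvGet2 (xss : List (List Int)) (i j : Int) : Int :=
  PySem.List.pyGetD (PySem.List.pyGetD xss i []) j 0

-- ===== PORT A =====
-- A's recursion, with dp threaded (Python mutates it) and a fuel guard for totality;
-- inside Pre_ the fuel grid.length + 1 is never exhausted.
def goA (fuel : Nat) (row col : Int) (grid : List (List Int)) (dp : List (List Int)) :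
    Int × List (List Int) :=
  match fuel with
  | 0 => (0, dp)
  | fuel + 1 =>
    if pvGet2 dp row col ≠ -1 then (pvGet2 dp row col, dp)
    else if row = (grid.length : Int) - 1 then (pvGet2 grid row col, dp)
    else
      let r1 := goA fuel (row + 1) col grid dp
      let down := pvGet2 grid row col + r1.1
      let r2 := goA fuel (row + 1) (col + 1) grid r1.2
      let diagonal := pvGet2 grid row col + r2.1
      let dp2 := PySem.List.pySetD r2.2 row
        (PySem.List.pySetD (PySem.List.pyGetD r2.2 row []) col (min down diagonal))
      (pvGet2 dp2 row col, dp2)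

def minTriPathMemo (row : Int) (col : Int) (grid : List (List Int)) (dp : List (List Int)) : Int :=
  (goA (grid.length + 1) row col grid dp).1

-- ===== PORT B =====
-- solve_row of Source B: the list of optimal values of row r (fuel = number of rows left).
def solveRow (grid dp : List (List Int)) (n : Int) (fuel : Nat) (r : Int) : List Int :=
  match fuel with
  | 0 => []
  | fuel + 1 =>
    if r = n - 1 then
      (PySem.List.pyRange 0 (r + 1) 1).map (fun c =>
        if pvGet2 dp r c ≠ -1 then pvGet2 dp r c else pvGet2 grid r c)
    else
      let nxt := solveRow grid dp n fuel (r + 1)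
      (PySem.List.pyRange 0 (r + 1) 1).map (fun c =>
        if pvGet2 dp r c ≠ -1 then pvGet2 dp r c
        else pvGet2 grid r c +
          min (PySem.List.pyGetD nxt c 0) (PySem.List.pyGetD nxt (c + 1) 0))

def minTriPathMemo_alt (row : Int) (col : Int) (grid : List (List Int)) (dp : List (List Int)) : Int :=
  if pvGet2 dp row col ≠ -1 then pvGet2 dp row col
  else
    let n : Int := (grid.length : Int)
    PySem.List.pyGetD (solveRow grid dp n (n - row).toNat row) col 0

-- ===== PRECONDITION & SPEC =====
-- Pre_ admits (1) any input whose dp[row][col] exists (Python indexing) and is ≠ -1 —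
-- both programs return it at once — and otherwise (2) the natural domain: a triangle
-- position 0 ≤ col ≤ row < len(grid) whose rows from `row` down have ≥ r+1 entries in
-- grid and dp.  Excluded (one cite in claim.json): malformed shapes on which A happens
-- to return by touching only in-range cells while B's row tabulation raises IndexError.
def Pre_minTriPathMemo (row : Int) (col : Int) (grid : List (List Int)) (dp : List (List Int)) : Prop :=
  (((PySem.List.pyGet? dp row).bind (fun d => PySem.List.pyGet? d col)).getD (-1) ≠ -1)
  ∨ (0 ≤ row ∧ row < (grid.length : Int) ∧ 0 ≤ col ∧ col ≤ row ∧
     grid.length ≤ dp.length ∧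
     ∀ r ∈ List.range grid.length, row ≤ (r : Int) →
       r + 1 ≤ (grid.getD r []).length ∧ r + 1 ≤ (dp.getD r []).length)

instance (row : Int) (col : Int) (grid : List (List Int)) (dp : List (List Int)) : Decidable (Pre_minTriPathMemo row col grid dp) := by unfold Pre_minTriPathMemo; infer_instance

def pvWitness_minTriPathMemo : Int × Int × List (List Int) × List (List Int) :=
  (0, 0, [[1], [2, 3]], [[-1], [-1, -1]])

def Spec_minTriPathMemo (row : Int) (col : Int) (grid : List (List Int)) (dp : List (List Int)) (out : Int) : Prop := out = minTriPathMemo_alt row col grid dp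
instance (row : Int) (col : Int) (grid : List (List Int)) (dp : List (List Int)) (out : Int) : Decidable (Spec_minTriPathMemo row col grid dp out) := by unfold Spec_minTriPathMemo; infer_instance

-- ===== CLAIM (what is proved, stated in full; the proofs are below) =====
def Claim_equal_minTriPathMemo : Prop := ∀ (row : Int) (col : Int) (grid : List (List Int)) (dp : List (List Int)), Dom_minTriPathMemo row col grid dp → Pre_minTriPathMemo row col grid dp → Spec_minTriPathMemo row col grid dp (minTriPathMemo row col grid dp)

-- ===== LEMMAS AND PROOFS =====

-- Nat-indexed cell access (the form used throughout the proofs).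
def gN (xss : List (List Int)) (i j : Nat) : Int := (xss.getD i []).getD j 0

lemma pvGet2_nat (xss : List (List Int)) (i j : Nat) :
    pvGet2 xss (i : Int) (j : Int) = gN xss i j := by
  simp [pvGet2, gN, PySem.List.pyGetD_natCast]

-- the pure value of cell (r,c): B's row tabulation read at c
def fN (grid dp : List (List Int)) (r c : Nat) : Int :=
  PySem.List.pyGetD (solveRow grid dp (grid.length : Int) (grid.length - r) (r : Int)) (c : Int) 0

lemma fN_unfold (grid dp : List (List Int)) (r c : Nat)
    (hr : r < grid.length) (hc : c ≤ r) :
    fN grid dp r c =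
      if gN dp r c ≠ -1 then gN dp r c
      else if r = grid.length - 1 then gN grid r c
      else gN grid r c + min (fN grid dp (r + 1) c) (fN grid dp (r + 1) (c + 1)) := by
  have hfuel : grid.length - r = (grid.length - (r + 1)) + 1 := by omega
  have hcast : (r : Int) + 1 = ((r + 1 : Nat) : Int) := by push_cast; ring
  have hlt : c < r + 1 := by omega
  by_cases hlast : r = grid.length - 1
  · have hlast' : (r : Int) = (grid.length : Int) - 1 := by omega
    rw [fN, hfuel, solveRow, if_pos hlast', hcast,
      PySem.List.pyGetD_map_pyRange _ (r + 1) c 0 hlt, if_pos hlast]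
    simp [pvGet2_nat]
  · have hlast' : ¬ (r : Int) = (grid.length : Int) - 1 := by
      intro h; apply hlast; omega
    rw [fN, hfuel, solveRow, if_neg hlast', hcast,
      PySem.List.pyGetD_map_pyRange _ (r + 1) c 0 hlt, if_neg hlast]
    simp only [pvGet2_nat, fN]
    norm_cast

-- dp' agrees with dp except that some cells that were -1 in dp now hold their fN value
def Coh (grid dp : List (List Int)) (dp' : List (List Int)) : Prop :=
  dp'.length = dp.length ∧
  ∀ i : Nat, i < dp.length →
    (dp'.getD i []).length = (dp.getD i []).length ∧
    ∀ j : Nat, j < (dp.getD i []).length →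
      (gN dp i j ≠ -1 → gN dp' i j = gN dp i j) ∧
      (gN dp i j = -1 → gN dp' i j = -1 ∨
        (i < grid.length ∧ j ≤ i ∧ gN dp' i j = fN grid dp i j))

lemma rowlen_set (xss : List (List Int)) (r c i : Nat) (v : Int) :
    ((xss.set r ((xss.getD r []).set c v)).getD i []).length = (xss.getD i []).length := by
  by_cases hi : i = r
  · subst hi
    by_cases hr : i < xss.length
    · simp [List.getD_eq_getElem?_getD, List.getElem?_set, hr]
    · simp [List.getD_eq_getElem?_getD, List.getElem?_set, hr]
  · simp [List.getD_eq_getElem?_getD, List.getElem?_set, Ne.symm hi]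

lemma gN_set (xss : List (List Int)) (r c i j : Nat) (v : Int) (hr : r < xss.length) :
    gN (xss.set r ((xss.getD r []).set c v)) i j =
      if i = r ∧ j = c ∧ c < (xss.getD r []).length then v else gN xss i j := by
  unfold gN
  by_cases hi : i = r
  · subst hi
    have hrow : (xss.set i ((xss.getD i []).set c v)).getD i [] = (xss.getD i []).set c v := by
      simp [List.getD_eq_getElem?_getD, List.getElem?_set, hr]
    rw [hrow]
    by_cases hj : j = c
    · subst hj
      by_cases hc : j < (xss.getD i []).length
      · simp only [List.getD_eq_getElem?_getD] at hc ⊢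
        simp [List.getElem?_set, hc]
      · simp only [List.getD_eq_getElem?_getD] at hc ⊢
        simp [List.getElem?_set, hc]
    · simp [List.getD_eq_getElem?_getD, List.getElem?_set, hj, Ne.symm hj]
  · simp [List.getD_eq_getElem?_getD, List.getElem?_set, hi, Ne.symm hi]

lemma goA_spec (grid dp : List (List Int))
    (hlen : grid.length ≤ dp.length)
    (row0 : Int)
    (hrows : ∀ r : Nat, r < grid.length → row0 ≤ (r : Int) →
       r + 1 ≤ (grid.getD r []).length ∧ r + 1 ≤ (dp.getD r []).length) :
    ∀ fuel : Nat, ∀ r c : Nat, ∀ dp' : List (List Int),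
      Coh grid dp dp' → row0 ≤ (r : Int) → r < grid.length → c ≤ r →
      grid.length - r ≤ fuel →
      (goA fuel (r : Int) (c : Int) grid dp').1 = fN grid dp r c ∧
      Coh grid dp (goA fuel (r : Int) (c : Int) grid dp').2 := by
  intro fuel
  induction fuel with
  | zero =>
    intro r c dp' _ _ hr _ hfuel
    exfalso; omega
  | succ fuel ih =>
    intro r c dp' hcoh hrow0 hr hc hfuel
    obtain ⟨hL, hcells⟩ := hcoh
    have hrdp : r < dp.length := lt_of_lt_of_le hr hlen
    have hrowsr := hrows r hr hrow0
    have hcdp : c < (dp.getD r []).length := by omega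
    obtain ⟨hrowlen, hcell⟩ := hcells r hrdp
    have hcellc := hcell c hcdp
    rw [goA]
    simp only [pvGet2_nat]
    by_cases hv : gN dp' r c ≠ -1
    · rw [if_pos hv]
      refine ⟨?_, hL, hcells⟩
      by_cases hv0 : gN dp r c ≠ -1
      · rw [hcellc.1 hv0, fN_unfold grid dp r c hr hc, if_pos hv0]
      · push_neg at hv0
        rcases hcellc.2 hv0 with h | ⟨_, _, h⟩
        · exact absurd h hv
        · exact h
    · push_neg at hv
      rw [if_neg (by simp [hv])]
      have hv0 : gN dp r c = -1 := by
        by_contra h0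
        have := hcellc.1 h0
        omega
      by_cases hlast : (r : Int) = (grid.length : Int) - 1
      · rw [if_pos hlast]
        refine ⟨?_, hL, hcells⟩
        show gN grid r c = fN grid dp r c
        rw [fN_unfold grid dp r c hr hc, if_neg (by simp [hv0]),
          if_pos (by omega : r = grid.length - 1)]
      · rw [if_neg hlast]
        have hr1 : r + 1 < grid.length := by omega
        have hc1 : (r : Int) + 1 = ((r + 1 : Nat) : Int) := by push_cast; ring
        have hc2 : (c : Int) + 1 = ((c + 1 : Nat) : Int) := by push_cast; ring
        rw [hc1, hc2]
        have H1 := ih (r + 1) c dp' ⟨hL, hcells⟩ (by push_cast; omega)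
          hr1 (by omega) (by omega)
        have H2 := ih (r + 1) (c + 1) (goA fuel ((r + 1 : Nat) : Int) (c : Nat) grid dp').2
          H1.2 (by push_cast; omega) hr1 (by omega) (by omega)
        obtain ⟨hL2, hcells2⟩ := H2.2
        have hrd2 : r < (goA fuel ((r + 1 : Nat) : Int) ((c + 1 : Nat) : Int) grid
            (goA fuel ((r + 1 : Nat) : Int) (c : Nat) grid dp').2).2.length := by
          rw [hL2]; exact hrdp
        obtain ⟨hrowlen2, hcell2⟩ := hcells2 r hrdp
        have hcd2 : c < ((goA fuel ((r + 1 : Nat) : Int) ((c + 1 : Nat) : Int) grid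
            (goA fuel ((r + 1 : Nat) : Int) (c : Nat) grid dp').2).2.getD r []).length := by
          rw [hrowlen2]; exact hcdp
        simp only [PySem.List.pySetD_natCast, PySem.List.pyGetD_natCast, pvGet2_nat,
          Int.toNat_natCast]
        set D2 := (goA fuel ((r + 1 : Nat) : Int) ((c + 1 : Nat) : Int) grid
          (goA fuel ((r + 1 : Nat) : Int) (c : Nat) grid dp').2).2 with hD2
        set val := min (gN grid r c + (goA fuel ((r + 1 : Nat) : Int) (c : Nat) grid dp').1)
          (gN grid r c + (goA fuel ((r + 1 : Nat) : Int) ((c + 1 : Nat) : Int) grid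
            (goA fuel ((r + 1 : Nat) : Int) (c : Nat) grid dp').2).1) with hval
        have hvalf : val = fN grid dp r c := by
          rw [hval, H1.1, H2.1, fN_unfold grid dp r c hr hc, if_neg (by simp [hv0]),
            if_neg (by omega : ¬ r = grid.length - 1)]
          omega
        constructor
        · rw [gN_set _ _ _ _ _ _ hrd2, if_pos ⟨rfl, rfl, hcd2⟩, hvalf]
        · refine ⟨by simp [hL2], ?_⟩
          intro i hi
          obtain ⟨hlen_i, hcell_i⟩ := hcells2 i hi
          constructor
          · rw [rowlen_set]; exact hlen_i
          · intro j hj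
            rw [gN_set _ _ _ _ _ _ hrd2]
            by_cases hij : i = r ∧ j = c ∧ c < (D2.getD r []).length
            · obtain ⟨hi', hj', _⟩ := hij
              subst hi'; subst hj'
              rw [if_pos ⟨rfl, rfl, hcd2⟩]
              exact ⟨fun h0 => absurd h0 (by simp [hv0]), fun _ => Or.inr ⟨hr, hc, hvalf⟩⟩
            · rw [if_neg hij]
              exact hcell_i j hj

lemma pvGet2_bind (dp : List (List Int)) (i j : Int) :
    pvGet2 dp i j =
      ((PySem.List.pyGet? dp i).bind (fun d => PySem.List.pyGet? d j)).getD 0 := by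
  have h0 : ∀ (o : Option (List Int)),
      PySem.List.pyGetD (o.getD []) j 0 = (o.bind (fun d => PySem.List.pyGet? d j)).getD 0 := by
    intro o
    cases o with
    | none =>
      have he : PySem.List.pyGet? ([] : List Int) j = none := by
        rw [PySem.List.pyGet?_eq_none_iff]
        simp [PySem.Raise.InRange]
      simp [show PySem.List.pyGetD ([] : List Int) j 0 = (PySem.List.pyGet? ([] : List Int) j).getD 0 from rfl, he]
    | some d => rfl
  show PySem.List.pyGetD ((PySem.List.pyGet? dp i).getD []) j 0 = _
  exact h0 _

theorem minTriPathMemo_spec : Claim_equal_minTriPathMemo := by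
  intro row col grid dp _ hpre
  unfold Spec_minTriPathMemo minTriPathMemo minTriPathMemo_alt
  by_cases hv : pvGet2 dp row col ≠ -1
  · rw [goA, if_pos hv, if_pos hv]
  · rw [if_neg hv]
    push_neg at hv
    rcases hpre with h1 | ⟨hr0, hrlt, hc0, hcr, hlen, hrows⟩
    · exfalso
      rw [pvGet2_bind] at hv
      rcases hb : (PySem.List.pyGet? dp row).bind (fun d => PySem.List.pyGet? d col) with _ | v
      · rw [hb] at h1; simp at h1
      · rw [hb] at h1 hv; simp at h1 hv; omega
    · have cohdp : Coh grid dp dp :=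
        ⟨rfl, fun i _ => ⟨rfl, fun j _ => ⟨fun _ => rfl, fun h => Or.inl h⟩⟩⟩
      have hrows' : ∀ r : Nat, r < grid.length → row ≤ (r : Int) →
          r + 1 ≤ (grid.getD r []).length ∧ r + 1 ≤ (dp.getD r []).length := by
        intro r h1 h2
        exact hrows r (List.mem_range.mpr h1) h2
      have hrN : row.toNat < grid.length := by omega
      have hcN : col.toNat ≤ row.toNat := by omega
      have hrow : row = ((row.toNat : Nat) : Int) := by omega
      have hcol : col = ((col.toNat : Nat) : Int) := by omega
      have H := goA_spec grid dp hlen row hrows' (grid.length + 1) row.toNat col.toNat dp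
        cohdp (by omega) hrN hcN (by omega)
      rw [hrow, hcol, H.1, fN]
      have htn : ((grid.length : Int) - ((row.toNat : Nat) : Int)).toNat
          = grid.length - row.toNat := by omega
      dsimp only
      rw [htn]
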